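-- pv_equiv track=rewrite | github.com/sagarbhagwatkar/ai-data-modeller | modeling.py | are_types_compatible
-- ===== SOURCE A (Python) =====
-- def are_types_compatible(type1: str, type2: str) -> bool:
--     """
--     Check if two data types are compatible for relationships.
--
--     Args:
--         type1: First data type
--         type2: Second data type
--
--     Returns:
--         True if types are compatible
--     """
--     # Normalize type names
--     type1_norm = type1.lower().replace('64', '').replace('32', '')
--     type2_norm = type2.lower().replace('64', '').replace('32', '')
--
--     # Define compatible type groups
--     numeric_types = {'int', 'float', 'number'}
--     string_types = {'object', 'string', 'category'}
--
--     # Check compatibility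
--     if (any(t in type1_norm for t in numeric_types) and
--         any(t in type2_norm for t in numeric_types)):
--         return True
--
--     if (any(t in type1_norm for t in string_types) and
--         any(t in type2_norm for t in string_types)):
--         return True
--
--     return type1_norm == type2_norm
-- ===== SOURCE B (Python) =====
-- _KEY2GROUP = {'int': 'n', 'float': 'n', 'number': 'n',
--               'object': 's', 'string': 's', 'category': 's'}
-- _KEYLENS = (3, 5, 6, 8)  # the distinct keyword lengths
--
--
-- def _groups(s: str) -> set:
--     # scan every start position once and look the window up in a hash table,
--     # instead of running a separate substring search per keyword
--     found = set()
--     for i in range(len(s)):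
--         for L in _KEYLENS:
--             g = _KEY2GROUP.get(s[i:i + L])
--             if g is not None:
--                 found.add(g)
--     return found
--
--
-- def are_types_compatible(type1: str, type2: str) -> bool:
--     a = type1.lower().replace('64', '').replace('32', '')
--     b = type2.lower().replace('64', '').replace('32', '')
--     return bool(_groups(a) & _groups(b)) or a == b
-- ===== Notes on version B (the rewrite author's own statement) =====
-- stated objective: alternative
-- what changed: Instead of running a separate substring search for each of the six keywords, B scans each normalized string once by start position and looks each fixed-length window up in a keyword->group hash table, collecting group labels and intersecting the two label sets.
import Mathlib
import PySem

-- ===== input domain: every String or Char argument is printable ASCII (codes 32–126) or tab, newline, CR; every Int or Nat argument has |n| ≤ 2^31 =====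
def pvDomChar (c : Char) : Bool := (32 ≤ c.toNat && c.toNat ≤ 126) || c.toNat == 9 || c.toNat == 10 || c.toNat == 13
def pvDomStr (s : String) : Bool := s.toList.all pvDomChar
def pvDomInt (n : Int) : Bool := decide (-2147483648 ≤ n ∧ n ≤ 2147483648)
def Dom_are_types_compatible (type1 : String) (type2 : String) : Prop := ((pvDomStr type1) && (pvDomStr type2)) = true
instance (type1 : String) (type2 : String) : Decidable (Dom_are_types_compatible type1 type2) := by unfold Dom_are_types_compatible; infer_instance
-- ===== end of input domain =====

-- B replaces A's per-keyword substring searches by a single scan over start positions with hash-table window lookups and a label-set intersection (alternative algorithm; not faster).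


-- ===== PORT A =====
def are_types_compatible (type1 : String) (type2 : String) : Bool :=
  let type1_norm := PySem.Str.replace (PySem.Str.replace (PySem.Str.lower type1) "64" "") "32" ""
  let type2_norm := PySem.Str.replace (PySem.Str.replace (PySem.Str.lower type2) "64" "") "32" ""
  let numeric_types : PySem.Set String := PySem.Set.ofList ["int", "float", "number"]
  let string_types : PySem.Set String := PySem.Set.ofList ["object", "string", "category"]
  if numeric_types.any (fun t => PySem.Str.isIn t type1_norm) &&
     numeric_types.any (fun t => PySem.Str.isIn t type2_norm) then
    true
  else if string_types.any (fun t => PySem.Str.isIn t type1_norm) &&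
          string_types.any (fun t => PySem.Str.isIn t type2_norm) then
    true
  else
    type1_norm == type2_norm

-- ===== PORT B =====
def pvKey2Group : PySem.Dict String String :=
  PySem.Dict.ofList [("int", "n"), ("float", "n"), ("number", "n"),
                     ("object", "s"), ("string", "s"), ("category", "s")]

def pvKeyLens : List Int := [3, 5, 6, 8]

-- inner-loop body of _groups: look the window s[i:i+L] up and add its group if present
def pvStep (s : String) (i : Int) (found : PySem.Set String) (L : Int) : PySem.Set String :=
  match pvKey2Group.get? (PySem.Str.slice s (some i) (some (i + L))) with
  | some g => PySem.Set.add found g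
  | none => found

def pvGroups (s : String) : PySem.Set String :=
  (PySem.List.pyRange 0 (PySem.Str.len s) 1).foldl
    (fun found i => pvKeyLens.foldl (pvStep s i) found)
    PySem.Set.empty

def are_types_compatible_alt (type1 : String) (type2 : String) : Bool :=
  let a := PySem.Str.replace (PySem.Str.replace (PySem.Str.lower type1) "64" "") "32" ""
  let b := PySem.Str.replace (PySem.Str.replace (PySem.Str.lower type2) "64" "") "32" ""
  !(PySem.Set.inter (pvGroups a) (pvGroups b)).isEmpty || a == b

-- ===== PRECONDITION & SPEC =====
def Spec_are_types_compatible (type1 : String) (type2 : String) (out : Bool) : Prop := out = are_types_compatible_alt type1 type2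
instance (type1 : String) (type2 : String) (out : Bool) : Decidable (Spec_are_types_compatible type1 type2 out) := by unfold Spec_are_types_compatible; infer_instance

-- ===== CLAIM (what is proved, stated in full; the proofs are below) =====
def Claim_equal_are_types_compatible : Prop := ∀ (type1 : String) (type2 : String), Dom_are_types_compatible type1 type2 → Spec_are_types_compatible type1 type2 (are_types_compatible type1 type2)

-- ===== LEMMAS AND PROOFS =====\n
theorem mem_pvStep (s : String) (i : Int) (found : PySem.Set String) (L : Int) (x : String) :
    x ∈ pvStep s i found L ↔
      x ∈ found ∨ pvKey2Group.get? (PySem.Str.slice s (some i) (some (i + L))) = some x := by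
  unfold pvStep
  cases h : pvKey2Group.get? (PySem.Str.slice s (some i) (some (i + L))) with
  | none => simp
  | some g => simp [PySem.Set.mem_add]; tauto

theorem mem_inner (s : String) (i : Int) (x : String) :
    ∀ (ls : List Int) (found : PySem.Set String),
      x ∈ ls.foldl (pvStep s i) found ↔
        x ∈ found ∨ ∃ L ∈ ls, pvKey2Group.get? (PySem.Str.slice s (some i) (some (i + L))) = some x := by
  intro ls
  induction ls with
  | nil => simp
  | cons L rest ih =>
      intro found
      simp only [List.foldl_cons, ih, mem_pvStep, List.mem_cons]
      constructor
      · rintro ((h | h) | ⟨L', hL', h⟩)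
        · exact Or.inl h
        · exact Or.inr ⟨L, Or.inl rfl, h⟩
        · exact Or.inr ⟨L', Or.inr hL', h⟩
      · rintro (h | ⟨L', (rfl | hL'), h⟩)
        · exact Or.inl (Or.inl h)
        · exact Or.inl (Or.inr h)
        · exact Or.inr ⟨L', hL', h⟩

theorem mem_outer (s : String) (x : String) :
    ∀ (is : List Int) (found : PySem.Set String),
      x ∈ is.foldl (fun found i => pvKeyLens.foldl (pvStep s i) found) found ↔
        x ∈ found ∨ ∃ i ∈ is, ∃ L ∈ pvKeyLens,
          pvKey2Group.get? (PySem.Str.slice s (some i) (some (i + L))) = some x := by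
  intro is
  induction is with
  | nil => simp
  | cons i rest ih =>
      intro found
      simp only [List.foldl_cons, ih, mem_inner, List.mem_cons]
      constructor
      · rintro ((h | h) | ⟨i', hi', h⟩)
        · exact Or.inl h
        · exact Or.inr ⟨i, Or.inl rfl, h⟩
        · exact Or.inr ⟨i', Or.inr hi', h⟩
      · rintro (h | ⟨i', (rfl | hi'), h⟩)
        · exact Or.inl (Or.inl h)
        · exact Or.inl (Or.inr h)
        · exact Or.inr ⟨i', hi', h⟩

theorem mem_pvGroups (s : String) (x : String) :
    x ∈ pvGroups s ↔ ∃ i ∈ PySem.List.pyRange 0 (PySem.Str.len s) 1, ∃ L ∈ pvKeyLens,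
      pvKey2Group.get? (PySem.Str.slice s (some i) (some (i + L))) = some x := by
  unfold pvGroups
  rw [mem_outer]
  simp [PySem.Set.empty]

-- lookup in the literal dict: which keys map to which value
theorem get?_pvKey2Group (t : String) (x : String) :
    pvKey2Group.get? t = some x ↔
      ((t = "int" ∨ t = "float" ∨ t = "number") ∧ x = "n") ∨
      ((t = "object" ∨ t = "string" ∨ t = "category") ∧ x = "s") := by
  have hmk : pvKey2Group = PySem.Dict.mk [("int", "n"), ("float", "n"), ("number", "n"),
      ("object", "s"), ("string", "s"), ("category", "s")] := rfl
  rw [hmk]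
  simp only [PySem.Dict.get?_mk_cons]
  split_ifs with h1 h2 h3 h4 h5 h6
  · rw [beq_iff_eq] at h1; subst h1; simp [eq_comm]
  · rw [beq_iff_eq] at h2; subst h2; simp [eq_comm]
  · rw [beq_iff_eq] at h3; subst h3; simp [eq_comm]
  · rw [beq_iff_eq] at h4; subst h4; simp [eq_comm]
  · rw [beq_iff_eq] at h5; subst h5; simp [eq_comm]
  · rw [beq_iff_eq] at h6; subst h6; simp [eq_comm]
  · have hnil : (PySem.Dict.mk ([] : List (String × String))).get? t = none := rfl
    rw [hnil]
    simp only [reduceCtorEq, false_iff]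
    rintro (⟨(rfl | rfl | rfl), _⟩ | ⟨(rfl | rfl | rfl), _⟩) <;> simp_all

-- a window equal to a nonempty key is an occurrence of it
theorem isIn_of_slice_eq (s k : String) (i L : Int) (hi : 0 ≤ i) (hL : 0 ≤ L)
    (_hk : k.toList ≠ []) (h : PySem.Str.slice s (some i) (some (i + L)) = k) :
    PySem.Str.isIn k s = true := by
  rw [PySem.Str.isIn_iff_infix]
  have hl := congrArg String.toList h
  rw [PySem.Str.toList_slice, PySem.Chars.slice_eq_listSlice,
      PySem.List.slice_toNat _ hi (by omega)] at hl
  rw [← hl]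
  exact ((List.take_prefix _ _).isInfix).trans (List.drop_suffix _ _).isInfix

-- an occurrence of a key of length L yields a window equal to it
theorem slice_eq_of_isIn (s k : String) (h : PySem.Str.isIn k s = true) (hk : k.toList ≠ []) :
    ∃ j : Nat, j < s.toList.length ∧
      PySem.Str.slice s (some (j : Int)) (some ((j : Int) + (k.toList.length : Int))) = k := by
  rw [PySem.Str.isIn_iff_infix] at h
  obtain ⟨l, r, hlr⟩ := h
  have hkpos : 0 < k.toList.length := List.length_pos_iff.mpr hk
  refine ⟨l.length, ?_, ?_⟩
  · rw [← hlr]; simp only [List.length_append]; omega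
  · apply String.ext
    rw [PySem.Str.toList_slice, PySem.Chars.slice_eq_listSlice,
        PySem.List.slice_natCast_add, ← hlr, List.append_assoc, List.drop_left, List.take_left]

-- an occurrence of a table key yields a window witness for its group
theorem exists_window (s k g : String) (h : PySem.Str.isIn k s = true) (hk : k.toList ≠ [])
    (hmem : ((k.toList.length : Nat) : Int) ∈ pvKeyLens)
    (hget : pvKey2Group.get? k = some g) :
    ∃ i ∈ PySem.List.pyRange 0 (PySem.Str.len s) 1, ∃ L ∈ pvKeyLens,
      pvKey2Group.get? (PySem.Str.slice s (some i) (some (i + L))) = some g := by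
  obtain ⟨j, hj, hslice⟩ := slice_eq_of_isIn s k h hk
  refine ⟨(j : Int), ?_, _, hmem, by rw [hslice]; exact hget⟩
  rw [PySem.List.mem_pyRange_one]
  refine ⟨by exact_mod_cast Nat.zero_le j, ?_⟩
  have hlen : PySem.Str.len s = (s.toList.length : Int) := by simp [PySem.Str.len]
  rw [hlen]; exact_mod_cast hj

theorem mem_pvGroups_n (s : String) :
    "n" ∈ pvGroups s ↔
      (PySem.Str.isIn "int" s = true ∨ PySem.Str.isIn "float" s = true ∨
       PySem.Str.isIn "number" s = true) := by
  rw [mem_pvGroups]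
  constructor
  · rintro ⟨i, hi, L, hL, h⟩
    rw [get?_pvKey2Group] at h
    rw [PySem.List.mem_pyRange_one] at hi
    have hLpos : 0 ≤ L := by
      simp only [pvKeyLens, List.mem_cons, List.not_mem_nil, or_false] at hL
      omega
    rcases h with ⟨(h' | h' | h'), _⟩ | ⟨_, hsn⟩
    · exact Or.inl (isIn_of_slice_eq s _ i L hi.1 hLpos (by decide) h')
    · exact Or.inr (Or.inl (isIn_of_slice_eq s _ i L hi.1 hLpos (by decide) h'))
    · exact Or.inr (Or.inr (isIn_of_slice_eq s _ i L hi.1 hLpos (by decide) h'))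
    · exact absurd hsn (by decide)
  · rintro (h | h | h) <;>
      exact exists_window s _ _ h (by decide) (by decide) (by decide)

theorem mem_pvGroups_s (s : String) :
    "s" ∈ pvGroups s ↔
      (PySem.Str.isIn "object" s = true ∨ PySem.Str.isIn "string" s = true ∨
       PySem.Str.isIn "category" s = true) := by
  rw [mem_pvGroups]
  constructor
  · rintro ⟨i, hi, L, hL, h⟩
    rw [get?_pvKey2Group] at h
    rw [PySem.List.mem_pyRange_one] at hi
    have hLpos : 0 ≤ L := by
      simp only [pvKeyLens, List.mem_cons, List.not_mem_nil, or_false] at hL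
      omega
    rcases h with ⟨_, hsn⟩ | ⟨(h' | h' | h'), _⟩
    · exact absurd hsn (by decide)
    · exact Or.inl (isIn_of_slice_eq s _ i L hi.1 hLpos (by decide) h')
    · exact Or.inr (Or.inl (isIn_of_slice_eq s _ i L hi.1 hLpos (by decide) h'))
    · exact Or.inr (Or.inr (isIn_of_slice_eq s _ i L hi.1 hLpos (by decide) h'))
  · rintro (h | h | h) <;>
      exact exists_window s _ _ h (by decide) (by decide) (by decide)

theorem pvGroups_subset (s : String) (x : String) (hx : x ∈ pvGroups s) : x = "n" ∨ x = "s" := by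
  rw [mem_pvGroups] at hx
  obtain ⟨_, _, _, _, h⟩ := hx
  rw [get?_pvKey2Group] at h
  tauto

theorem inter_groups_nonempty (a b : String) :
    (!(PySem.Set.inter (pvGroups a) (pvGroups b)).isEmpty) = true ↔
      (("n" ∈ pvGroups a ∧ "n" ∈ pvGroups b) ∨ ("s" ∈ pvGroups a ∧ "s" ∈ pvGroups b)) := by
  rw [Bool.not_eq_eq_eq_not, Bool.not_true, List.isEmpty_eq_false_iff_exists_mem]
  constructor
  · rintro ⟨x, hx⟩
    rw [PySem.Set.mem_inter] at hx
    rcases pvGroups_subset a x hx.1 with rfl | rfl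
    · exact Or.inl ⟨hx.1, hx.2⟩
    · exact Or.inr ⟨hx.1, hx.2⟩
  · rintro (⟨h1, h2⟩ | ⟨h1, h2⟩)
    · exact ⟨"n", by rw [PySem.Set.mem_inter]; exact ⟨h1, h2⟩⟩
    · exact ⟨"s", by rw [PySem.Set.mem_inter]; exact ⟨h1, h2⟩⟩

-- A's any-over-the-set booleans, as membership of the group label in pvGroups
theorem any_num_iff (x : String) :
    ((PySem.Set.ofList ["int", "float", "number"] : PySem.Set String).any
        (fun t => PySem.Str.isIn t x) = true) ↔ "n" ∈ pvGroups x := by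
  rw [mem_pvGroups_n]
  have : (PySem.Set.ofList ["int", "float", "number"] : List String) =
      ["int", "float", "number"] := rfl
  rw [this]
  simp [List.any_cons]

theorem any_str_iff (x : String) :
    ((PySem.Set.ofList ["object", "string", "category"] : PySem.Set String).any
        (fun t => PySem.Str.isIn t x) = true) ↔ "s" ∈ pvGroups x := by
  rw [mem_pvGroups_s]
  have : (PySem.Set.ofList ["object", "string", "category"] : List String) =
      ["object", "string", "category"] := rfl
  rw [this]
  simp [List.any_cons]

-- ===== VERDICT (by name: the statement is the Claim_ definition above) =====
theorem are_types_compatible_spec : Claim_equal_are_types_compatible := by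
  intro type1 type2 _
  unfold Spec_are_types_compatible are_types_compatible are_types_compatible_alt
  dsimp only
  rw [Bool.eq_iff_iff, Bool.or_eq_true, inter_groups_nonempty]
  split_ifs with hA hB
  · rw [Bool.and_eq_true] at hA
    simp only [true_iff]
    exact Or.inl (Or.inl ⟨(any_num_iff _).mp hA.1, (any_num_iff _).mp hA.2⟩)
  · rw [Bool.and_eq_true] at hB
    simp only [true_iff]
    exact Or.inl (Or.inr ⟨(any_str_iff _).mp hB.1, (any_str_iff _).mp hB.2⟩)
  · constructor
    · intro h; exact Or.inr h
    · rintro ((⟨h1, h2⟩ | ⟨h1, h2⟩) | h)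
      · refine absurd ?_ hA
        rw [Bool.and_eq_true]
        exact ⟨(any_num_iff _).mpr h1, (any_num_iff _).mpr h2⟩
      · refine absurd ?_ hB
        rw [Bool.and_eq_true]
        exact ⟨(any_str_iff _).mpr h1, (any_str_iff _).mpr h2⟩
      · exact h
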